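-- pv_equiv track=rewrite | github.com/ecukuroglu/demultiplexer | fastqDemultiplexer.py | barcodeCombinationGenerator_withUnreadBase
-- ===== SOURCE A (Python) =====
-- from itertools import combinations
--
-- def barcodeCombinationGenerator_withUnreadBase(barcode, stationaryIndex, maxUnreadBase):
--     changeableIndexes = []
--     for i in list(range(len(barcode))):
--         if not i in stationaryIndex:
--             changeableIndexes.append(i)
--     barcodeDict = {}
--     barcodeDict[barcode] = barcode
--     if maxUnreadBase > 0:
--         for i in list(range(1, maxUnreadBase+1)):
--             for nIndexes in list(combinations(changeableIndexes, i)):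
--                 tempString = list(barcode)
--                 for j in nIndexes:
--                     tempString[j] = 'N'
--                 barcodeDict[''.join(tempString)] = barcode
--     return barcodeDict
-- ===== SOURCE B (Python) =====
-- def barcodeCombinationGenerator_withUnreadBase(barcode, stationaryIndex, maxUnreadBase):
--     # Budget-bounded DFS over the changeable positions (one recursion, no
--     # itertools.combinations); entries are then grouped by N-count so the
--     # dict is filled size-0 first, then size-1, ... up to the budget.
--     changeable = [i for i in range(len(barcode)) if i not in stationaryIndex]
--     depth = maxUnreadBase if maxUnreadBase > 0 else 0
--     entries = []
--
--     def dfs(pos, chars, used):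
--         if pos == len(changeable):
--             entries.append((used, ''.join(chars)))
--             return
--         i = changeable[pos]
--         if used < depth:
--             nchars = chars.copy()
--             nchars[i] = 'N'
--             dfs(pos + 1, nchars, used + 1)
--         dfs(pos + 1, chars, used)
--
--     dfs(0, list(barcode), 0)
--     barcodeDict = {}
--     for k in range(depth + 1):
--         for used, key in entries:
--             if used == k:
--                 barcodeDict[key] = barcode
--     return barcodeDict
-- ===== Notes on version B (the rewrite author's own statement) =====
-- stated objective: alternative
-- what changed: Replaces the size-grouped itertools.combinations loops by a single budget-bounded DFS over the changeable positions that emits (N-count, variant) entries, then fills the dict grouping the entries by N-count.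
import Mathlib
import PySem

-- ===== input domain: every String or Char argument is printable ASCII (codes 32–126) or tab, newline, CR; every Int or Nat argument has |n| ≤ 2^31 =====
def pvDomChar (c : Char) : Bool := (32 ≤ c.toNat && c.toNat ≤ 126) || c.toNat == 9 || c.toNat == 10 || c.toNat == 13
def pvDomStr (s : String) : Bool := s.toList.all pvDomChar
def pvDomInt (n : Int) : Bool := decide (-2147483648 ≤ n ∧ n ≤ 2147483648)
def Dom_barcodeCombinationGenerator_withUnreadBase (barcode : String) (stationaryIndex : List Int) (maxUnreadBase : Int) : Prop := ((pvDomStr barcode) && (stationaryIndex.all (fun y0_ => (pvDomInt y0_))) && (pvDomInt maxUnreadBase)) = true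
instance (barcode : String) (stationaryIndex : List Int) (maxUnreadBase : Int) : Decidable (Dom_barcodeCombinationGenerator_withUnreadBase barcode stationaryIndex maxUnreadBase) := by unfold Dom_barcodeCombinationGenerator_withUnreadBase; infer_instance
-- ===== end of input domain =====

-- B replaces the size-grouped itertools.combinations loops of A by one budget-bounded
-- DFS over the changeable positions plus a group-by-N-count pass (objective: alternative).

-- ===== PORT A =====
-- hand port of itertools.combinations(cs, k): lexicographic by position, exact
def pvCombA : List Int → Nat → List (List Int)
  | _, 0 => [[]]
  | [], _ + 1 => []
  | c :: cs, k + 1 => (pvCombA cs k).map (fun t => c :: t) ++ pvCombA cs (k + 1)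

def barcodeCombinationGenerator_withUnreadBase (barcode : String) (stationaryIndex : List Int) (maxUnreadBase : Int) : List (String × String) :=
  let changeableIndexes := (PySem.List.pyRange 0 (PySem.Str.len barcode) 1).foldl
      (fun acc i => if ¬ (i ∈ stationaryIndex) then acc ++ [i] else acc) []
  let barcodeDict : PySem.Dict String String := PySem.Dict.empty.insert barcode barcode
  let barcodeDict :=
    if maxUnreadBase > 0 then
      (PySem.List.pyRange 1 (maxUnreadBase + 1) 1).foldl (fun d i =>
        (pvCombA changeableIndexes i.toNat).foldl (fun d nIndexes =>
          -- tempString[j] = 'N': j comes from range(len(barcode)), so j ≥ 0 and .toNat is exact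
          let tempString := nIndexes.foldl (fun t j => t.set j.toNat 'N') barcode.toList
          d.insert (String.ofList tempString) barcode) d) barcodeDict
    else barcodeDict
  barcodeDict.items

-- ===== PORT B =====
-- DFS over remaining changeable positions; 'N' branch first (if budget allows), then keep
def pvDfsB (depth : Int) : List Int → List Char → Int → List (Int × String) → List (Int × String)
  | [], chars, used, entries => entries ++ [(used, String.ofList chars)]
  | c :: cs, chars, used, entries =>
      -- chars index c comes from range(len(barcode)): c ≥ 0, .toNat exact
      let entries := if used < depth then pvDfsB depth cs (chars.set c.toNat 'N') (used + 1) entries else entries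
      pvDfsB depth cs chars used entries

def barcodeCombinationGenerator_withUnreadBase_alt (barcode : String) (stationaryIndex : List Int) (maxUnreadBase : Int) : List (String × String) :=
  let changeable := (PySem.List.pyRange 0 (PySem.Str.len barcode) 1).filter (fun i => decide (i ∉ stationaryIndex))
  let depth := if maxUnreadBase > 0 then maxUnreadBase else 0
  let entries := pvDfsB depth changeable barcode.toList 0 []
  let d := (PySem.List.pyRange 0 (depth + 1) 1).foldl (fun d k =>
      entries.foldl (fun d e => if e.1 == k then d.insert e.2 barcode else d) d)
      (PySem.Dict.empty : PySem.Dict String String)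
  d.items

-- ===== PRECONDITION & SPEC =====
def Spec_barcodeCombinationGenerator_withUnreadBase (barcode : String) (stationaryIndex : List Int) (maxUnreadBase : Int) (out : List (String × String)) : Prop := out = barcodeCombinationGenerator_withUnreadBase_alt barcode stationaryIndex maxUnreadBase
instance (barcode : String) (stationaryIndex : List Int) (maxUnreadBase : Int) (out : List (String × String)) : Decidable (Spec_barcodeCombinationGenerator_withUnreadBase barcode stationaryIndex maxUnreadBase out) := by unfold Spec_barcodeCombinationGenerator_withUnreadBase; infer_instance

-- ===== CLAIM (what is proved, stated in full; the proofs are below) =====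
def Claim_equal_barcodeCombinationGenerator_withUnreadBase : Prop := ∀ (barcode : String) (stationaryIndex : List Int) (maxUnreadBase : Int), Dom_barcodeCombinationGenerator_withUnreadBase barcode stationaryIndex maxUnreadBase → Spec_barcodeCombinationGenerator_withUnreadBase barcode stationaryIndex maxUnreadBase (barcodeCombinationGenerator_withUnreadBase barcode stationaryIndex maxUnreadBase)

-- ===== LEMMAS AND PROOFS =====

-- DFS subsets (as index lists), 'take' branch first, with a budget
def pvSubs : List Int → Nat → List (List Int)
  | [], _ => [[]]
  | _ :: cs, 0 => pvSubs cs 0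
  | c :: cs, b + 1 => (pvSubs cs b).map (fun t => c :: t) ++ pvSubs cs (b + 1)

lemma pvCombA_zero (cs : List Int) : pvCombA cs 0 = [[]] := by
  cases cs <;> rfl

-- the subsets of size k among the budget-b DFS subsets are exactly combinations(cs, k), in order
lemma pvSubs_filter (cs : List Int) : ∀ (b k : Nat),
    (pvSubs cs b).filter (fun s => s.length == k) = if k ≤ b then pvCombA cs k else [] := by
  induction cs with
  | nil =>
      intro b k
      cases k with
      | zero => simp [pvSubs, pvCombA]
      | succ k => simp [pvSubs, pvCombA]
  | cons c cs ih =>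
      intro b k
      cases b with
      | zero =>
          cases k with
          | zero => simp [pvSubs, ih, pvCombA_zero]
          | succ k => simp [pvSubs, ih]
      | succ b =>
          cases k with
          | zero =>
              simp [pvSubs, List.filter_append, List.filter_map, ih, pvCombA_zero,
                    Function.comp_def]
          | succ k =>
              have hmap : ((pvSubs cs b).map (fun t => c :: t)).filter (fun s => s.length == k + 1)
                  = ((pvSubs cs b).filter (fun s => s.length == k)).map (fun t => c :: t) := by
                simp [List.filter_map, Function.comp_def]
              rw [pvSubs, List.filter_append, hmap, ih b k, ih (b + 1) (k + 1)]
              by_cases hk : k ≤ b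
              · simp [hk, Nat.succ_le_succ hk, pvCombA]
              · simp [hk, mt Nat.le_of_succ_le_succ hk]

-- the DFS entry list: all budgeted subsets, in DFS order, tagged with their size
lemma pvDfsB_spec (depth : Int) (cs : List Int) : ∀ (chars : List Char) (used : Int) (acc : List (Int × String)),
    pvDfsB depth cs chars used acc
      = acc ++ (pvSubs cs (depth - used).toNat).map
          (fun s => (used + (s.length : Int), String.ofList (s.foldl (fun t j => t.set j.toNat 'N') chars))) := by
  induction cs with
  | nil => intro chars used acc; simp [pvDfsB, pvSubs]
  | cons c cs ih =>
      intro chars used acc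
      by_cases h : used < depth
      · have hb : (depth - used).toNat = (depth - (used + 1)).toNat + 1 := by omega
        rw [pvDfsB]
        simp only [h, if_true]
        rw [ih, ih, hb, pvSubs, List.map_append, List.append_assoc, List.map_map]
        congr 2
        apply List.map_congr_left
        intro s _
        simp only [Function.comp_def, List.foldl_cons, List.length_cons]
        exact Prod.ext_iff.mpr ⟨by push_cast; ring, rfl⟩
      · have hb : (depth - used).toNat = 0 := by omega
        rw [pvDfsB]
        simp only [h, if_false]
        rw [ih, hb]
        rfl
  
lemma foldl_flat {α β δ : Type} (l : List α) (g : α → List β) (step : δ → β → δ) (d : δ) :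
    l.foldl (fun d x => (g x).foldl step d) d = (l.flatMap g).foldl step d := by
  induction l generalizing d with
  | nil => rfl
  | cons x l ih => simp [List.flatMap_cons, List.foldl_append, ih]

lemma foldl_if_filter {α β δ : Type} (l : List α) (p : α → Bool) (g : α → β) (step : δ → β → δ) (d : δ) :
    l.foldl (fun d x => if p x then step d (g x) else d) d = ((l.filter p).map g).foldl step d := by
  induction l generalizing d with
  | nil => rfl
  | cons x l ih => by_cases h : p x <;> simp [h, ih]

lemma List_foldl_congr {α δ : Type} {l l' : List α} {f g : δ → α → δ} {d : δ}
    (hl : l = l') (h : ∀ d x, x ∈ l → f d x = g d x) : l.foldl f d = l'.foldl g d := by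
  subst hl
  induction l generalizing d with
  | nil => rfl
  | cons x l ih =>
      simp only [List.foldl_cons, h d x List.mem_cons_self]
      exact ih (fun d y hy => h d y (List.mem_cons_of_mem _ hy))

-- both ports fold `insert · barcode` over the same key stream
lemma main_aux (barcode : String) (stationaryIndex : List Int) (maxUnreadBase : Int) :
    barcodeCombinationGenerator_withUnreadBase barcode stationaryIndex maxUnreadBase
      = barcodeCombinationGenerator_withUnreadBase_alt barcode stationaryIndex maxUnreadBase := by
  unfold barcodeCombinationGenerator_withUnreadBase barcodeCombinationGenerator_withUnreadBase_alt
  simp only []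
  set cs := (PySem.List.pyRange 0 (PySem.Str.len barcode) 1).filter
      (fun i => decide (i ∉ stationaryIndex)) with hcs
  have hchg : (PySem.List.pyRange 0 (PySem.Str.len barcode) 1).foldl
      (fun acc i => if ¬ (i ∈ stationaryIndex) then acc ++ [i] else acc) [] = cs := by
    rw [PySem.List.foldl_append_ite_eq_filter]; rfl
  rw [hchg]
  set strOf : List Int → String :=
      fun s => String.ofList (s.foldl (fun t j => t.set j.toNat 'N') barcode.toList) with hstrOf
  set step : PySem.Dict String String → String → PySem.Dict String String :=
      fun d s => d.insert s barcode with hstep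
  set depth : Int := if maxUnreadBase > 0 then maxUnreadBase else 0 with hdepth
  have hd0 : (0 : Int) ≤ depth := by rw [hdepth]; split <;> omega
  -- B side: flatten the grouped fold into one key stream
  have hentries : pvDfsB depth cs barcode.toList 0 []
      = (pvSubs cs depth.toNat).map (fun s => ((s.length : Int), strOf s)) := by
    rw [pvDfsB_spec]
    simp [hstrOf]
  have hg : ∀ k ∈ PySem.List.pyRange 0 (depth + 1) 1,
      (((pvDfsB depth cs barcode.toList 0 []).filter (fun e => e.1 == k)).map (fun e => e.2))
        = (pvCombA cs k.toNat).map strOf := by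
    intro k hk
    rw [PySem.List.mem_pyRange_one] at hk
    rw [hentries, List.filter_map, List.map_map]
    have hp : (pvSubs cs depth.toNat).filter ((fun e => e.1 == k) ∘ (fun s => ((s.length : Int), strOf s)))
        = (pvSubs cs depth.toNat).filter (fun s => s.length == k.toNat) := by
      apply List.filter_congr
      intro s _
      rw [Bool.eq_iff_iff]
      simp only [Function.comp_def, beq_iff_eq]
      constructor <;> (intro h; omega)
    rw [hp, pvSubs_filter]
    have : k.toNat ≤ depth.toNat := by omega
    simp [this, Function.comp_def]
  have hB : (PySem.List.pyRange 0 (depth + 1) 1).foldl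
        (fun d k => (pvDfsB depth cs barcode.toList 0 []).foldl
          (fun d e => if e.1 == k then d.insert e.2 barcode else d) d)
        (PySem.Dict.empty : PySem.Dict String String)
      = ((PySem.List.pyRange 0 (depth + 1) 1).flatMap
          (fun k => (pvCombA cs k.toNat).map strOf)).foldl step PySem.Dict.empty := by
    have h1 : ∀ (d : PySem.Dict String String) (k : Int),
        (pvDfsB depth cs barcode.toList 0 []).foldl
          (fun d e => if e.1 == k then d.insert e.2 barcode else d) d
        = (((pvDfsB depth cs barcode.toList 0 []).filter (fun e => e.1 == k)).map (fun e => e.2)).foldl step d := by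
      intro d k
      exact foldl_if_filter (pvDfsB depth cs barcode.toList 0 []) (fun e => e.1 == k) (fun e => e.2) step d
    calc (PySem.List.pyRange 0 (depth + 1) 1).foldl
          (fun d k => (pvDfsB depth cs barcode.toList 0 []).foldl
            (fun d e => if e.1 == k then d.insert e.2 barcode else d) d)
          (PySem.Dict.empty : PySem.Dict String String)
        = (PySem.List.pyRange 0 (depth + 1) 1).foldl
          (fun d k => ((((pvDfsB depth cs barcode.toList 0 []).filter (fun e => e.1 == k)).map (fun e => e.2))).foldl step d)
          PySem.Dict.empty := by
          exact List_foldl_congr rfl fun d k _ => h1 d k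
      _ = (PySem.List.pyRange 0 (depth + 1) 1).foldl
          (fun d k => ((pvCombA cs k.toNat).map strOf).foldl step d) PySem.Dict.empty := by
          exact List_foldl_congr rfl fun d k hk => by rw [hg k hk]
      _ = ((PySem.List.pyRange 0 (depth + 1) 1).flatMap
          (fun k => (pvCombA cs k.toNat).map strOf)).foldl step PySem.Dict.empty := by
          rw [foldl_flat]
  -- split off the k = 0 group: it is exactly the original barcode
  have hsplit : (PySem.List.pyRange 0 (depth + 1) 1).flatMap
        (fun k => (pvCombA cs k.toNat).map strOf)
      = barcode :: (PySem.List.pyRange 1 (depth + 1) 1).flatMap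
          (fun k => (pvCombA cs k.toNat).map strOf) := by
    rw [PySem.List.pyRange_one_cons (by omega : (0:Int) < depth + 1), List.flatMap_cons]
    have h0 : ((pvCombA cs (0:Int).toNat).map strOf) = [barcode] := by
      simp [pvCombA_zero, hstrOf]
    rw [h0]
    rfl
  rw [hB, hsplit, List.foldl_cons]
  -- A side
  by_cases hm : maxUnreadBase > 0
  · simp only [hm, if_true]
    have hde : depth = maxUnreadBase := by rw [hdepth]; simp [hm]
    rw [hde]
    have hA : ∀ d : PySem.Dict String String,
        (PySem.List.pyRange 1 (maxUnreadBase + 1) 1).foldl (fun d i =>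
          (pvCombA cs i.toNat).foldl (fun d nIndexes =>
            d.insert (String.ofList (nIndexes.foldl (fun t j => t.set j.toNat 'N') barcode.toList)) barcode) d) d
        = ((PySem.List.pyRange 1 (maxUnreadBase + 1) 1).flatMap
            (fun k => (pvCombA cs k.toNat).map strOf)).foldl step d := by
      intro d
      have h2 : ∀ (d : PySem.Dict String String) (l : List (List Int)),
          l.foldl (fun d nIndexes =>
            d.insert (String.ofList (nIndexes.foldl (fun t j => t.set j.toNat 'N') barcode.toList)) barcode) d
          = (l.map strOf).foldl step d := by
        intro d l
        rw [List.foldl_map]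
      have h3 : ∀ (l : List (List Int)) (d : PySem.Dict String String),
          (l.map strOf).foldl step d = l.foldl (fun d n => step d (strOf n)) d := by
        intro l d; rw [List.foldl_map]
      calc (PySem.List.pyRange 1 (maxUnreadBase + 1) 1).foldl (fun d i =>
            (pvCombA cs i.toNat).foldl (fun d nIndexes =>
              d.insert (String.ofList (nIndexes.foldl (fun t j => t.set j.toNat 'N') barcode.toList)) barcode) d) d
          = (PySem.List.pyRange 1 (maxUnreadBase + 1) 1).foldl (fun d i =>
            (pvCombA cs i.toNat).foldl (fun d n => step d (strOf n)) d) d := by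
            exact List_foldl_congr rfl fun d i _ => by rw [h2, h3]
        _ = ((PySem.List.pyRange 1 (maxUnreadBase + 1) 1).flatMap (fun i => pvCombA cs i.toNat)).foldl
              (fun d n => step d (strOf n)) d := by rw [foldl_flat]
        _ = ((PySem.List.pyRange 1 (maxUnreadBase + 1) 1).flatMap
              (fun k => (pvCombA cs k.toNat).map strOf)).foldl step d := by
            rw [← List.map_flatMap, List.foldl_map]
    rw [hA]
  · simp only [hm, if_false]
    have hde : depth = 0 := by rw [hdepth]; simp [hm]
    rw [hde]
    rw [show PySem.List.pyRange 1 (0 + 1) 1 = [] from rfl]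
    rfl

-- ===== VERDICT (by name: the statement is the Claim_ definition above) =====
theorem barcodeCombinationGenerator_withUnreadBase_spec : Claim_equal_barcodeCombinationGenerator_withUnreadBase := by
  intro barcode stationaryIndex maxUnreadBase _
  exact main_aux barcode stationaryIndex maxUnreadBase
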